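-- pv_equiv track=rewrite | github.com/aliahmadcse/perceptron | app.py | label_encoder
-- ===== SOURCE A (Python) =====
-- def label_encoder(labels):
--     unique_labels = {}
--     encode_labels = [0] * len(labels)
--
--     encode = 0
--     for index, label in enumerate(labels):
--         if label not in unique_labels:
--             unique_labels[label] = encode
--             encode += 1
--
--         encode_labels[index] = unique_labels[label]
--
--     return encode_labels
-- ===== SOURCE B (Python) =====
-- def label_encoder(labels):
--     # code of a label = number of distinct labels strictly before its first occurrence
--     return [len(set(labels[:labels.index(label)])) for label in labels]
-- ===== Notes on version B (the rewrite author's own statement) =====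
-- stated objective: alternative
-- what changed: Drops the label->code table entirely: each label's code is computed directly as the number of distinct labels preceding its first occurrence (len(set(prefix before labels.index(label)))), instead of A's stateful pass that builds a dict and counter while filling a preallocated array.
import Mathlib
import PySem

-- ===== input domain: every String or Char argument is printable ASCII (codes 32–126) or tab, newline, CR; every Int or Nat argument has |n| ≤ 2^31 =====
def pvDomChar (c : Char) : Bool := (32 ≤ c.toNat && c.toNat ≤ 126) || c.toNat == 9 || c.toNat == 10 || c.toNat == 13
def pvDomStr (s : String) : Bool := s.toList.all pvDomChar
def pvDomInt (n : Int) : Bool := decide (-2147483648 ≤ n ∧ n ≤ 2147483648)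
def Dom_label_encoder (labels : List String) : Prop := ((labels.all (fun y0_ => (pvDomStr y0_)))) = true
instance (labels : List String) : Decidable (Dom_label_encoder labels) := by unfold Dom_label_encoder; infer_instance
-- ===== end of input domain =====

-- B drops A's label->code dict entirely: each code is computed directly as the
-- number of distinct labels before the label's first occurrence (alternative algorithm, not faster).


-- ===== PORT A =====
-- A's loop body: state = (unique_labels, encode, encode_labels)
def label_encoder_step (st : PySem.Dict String Int × Int × List Int)
    (p : Int × String) : PySem.Dict String Int × Int × List Int :=
  let (uniq, encode) :=
    if ¬ (st.1.contains p.2) then (st.1.insert p.2 st.2.1, st.2.1 + 1)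
    else (st.1, st.2.1)
  (uniq, encode, PySem.List.pySetD st.2.2 p.1 (uniq.getD p.2 0))

def label_encoder (labels : List String) : List Int :=
  ((PySem.List.enumerate labels 0).foldl label_encoder_step
    (PySem.Dict.empty, 0, List.replicate labels.length (0 : Int))).2.2

-- ===== PORT B =====
-- [len(set(labels[:labels.index(label)])) for label in labels]
-- (list.index always succeeds here since label is drawn from labels; the none
-- branch is Python's unreachable ValueError)
def label_encoder_alt (labels : List String) : List Int :=
  labels.map (fun label =>
    match PySem.List.index? labels label with
    | some i => ((PySem.Set.ofList (PySem.List.slice labels none (some (i : Int)))).length : Int)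
    | none => 0)

-- ===== PRECONDITION & SPEC =====
def Spec_label_encoder (labels : List String) (out : List Int) : Prop := out = label_encoder_alt labels
instance (labels : List String) (out : List Int) : Decidable (Spec_label_encoder labels out) := by unfold Spec_label_encoder; infer_instance

-- ===== CLAIM (what is proved, stated in full; the proofs are below) =====
def Claim_equal_label_encoder : Prop := ∀ (labels : List String), Dom_label_encoder labels → Spec_label_encoder labels (label_encoder labels)

-- ===== LEMMAS AND PROOFS =====

-- the dict a first-appearance-ordered unique list induces (proof-side characterisation of A's dict)
def label_encoder_table (ys : List String) : PySem.Dict String Int :=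
  (PySem.List.enumerate ys 0).foldl (fun d p => d.insert p.2 p.1) PySem.Dict.empty

theorem table_append (zs : List String) (z : String) :
    label_encoder_table (zs ++ [z]) = (label_encoder_table zs).insert z (zs.length : Int) := by
  simp [label_encoder_table, PySem.List.enumerate_append, PySem.List.enumerate_cons]

theorem get?_table_eq_none_iff (ys : List String) (y : String) :
    (label_encoder_table ys).get? y = none ↔ y ∉ ys := by
  induction ys using List.reverseRecOn with
  | nil => simp [label_encoder_table]
  | append_singleton zs z ih =>
    rw [table_append, PySem.Dict.get?_insert]
    by_cases h : y = z <;> simp [h, ih]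

theorem set_append_cons {α : Type} (a : List α) (x : α) (r : List α) (v : α) :
    (a ++ x :: r).set a.length v = a ++ v :: r := by
  induction a with
  | nil => rfl
  | cons b a ih => simp [ih]

-- main invariant for A's fold
theorem label_encoder_inv (xs : List String) (N : Nat) (h : xs.length ≤ N) :
    (PySem.List.enumerate xs 0).foldl label_encoder_step
      (PySem.Dict.empty, 0, List.replicate N (0 : Int)) =
    (label_encoder_table (PySem.Set.ofList xs), ((PySem.Set.ofList xs).length : Int),
     xs.map (fun l => (label_encoder_table (PySem.Set.ofList xs)).getD l 0)
       ++ List.replicate (N - xs.length) (0 : Int)) := by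
  induction xs using List.reverseRecOn with
  | nil => simp [label_encoder_table, PySem.Set.ofList]
  | append_singleton xs x ih =>
    have hx : xs.length < N := by simpa using h
    rw [PySem.List.enumerate_append, List.foldl_append, ih (le_of_lt hx)]
    have hrep : List.replicate (N - xs.length) (0 : Int) =
        (0 : Int) :: List.replicate (N - (xs.length + 1)) (0 : Int) := by
      rw [← List.replicate_succ]; congr 1; omega
    have hlen : xs.length = (xs.map (fun l =>
        (label_encoder_table (PySem.Set.ofList xs)).getD l 0)).length := by simp
    by_cases hmem : x ∈ xs
    · -- old label: dict and counter unchanged, write the known code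
      have hc : (label_encoder_table (PySem.Set.ofList xs)).contains x = true := by
        rw [PySem.Dict.contains_eq_isSome_get?, Option.isSome_iff_ne_none, Ne,
          get?_table_eq_none_iff]
        simp [hmem]
      have hded : PySem.Set.ofList (xs ++ [x]) = PySem.Set.ofList xs := by
        rw [PySem.Set.ofList_append_singleton,
          PySem.Set.add_of_mem ((PySem.Set.mem_ofList xs x).mpr hmem)]
      simp only [PySem.List.enumerate_cons, PySem.List.enumerate_nil, List.foldl_cons,
        List.foldl_nil, label_encoder_step, hc, not_true, if_false,
        hded, zero_add]
      refine Prod.ext rfl (Prod.ext rfl ?_)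
      simp only [hrep, PySem.List.pySetD_natCast]
      rw [hlen, set_append_cons]
      simp
    · -- new label: dict gains x ↦ |set(xs)|, counter bumps
      have hc : (label_encoder_table (PySem.Set.ofList xs)).contains x = false := by
        rw [PySem.Dict.contains_eq_isSome_get?,
          (get?_table_eq_none_iff (PySem.Set.ofList xs) x).mpr
            (fun hcon => hmem ((PySem.Set.mem_ofList xs x).mp hcon))]
        rfl
      have hded : PySem.Set.ofList (xs ++ [x]) = PySem.Set.ofList xs ++ [x] := by
        rw [PySem.Set.ofList_append_singleton,
          PySem.Set.add_of_not_mem (fun hcon => hmem ((PySem.Set.mem_ofList xs x).mp hcon))]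
      simp only [PySem.List.enumerate_cons, PySem.List.enumerate_nil, List.foldl_cons,
        List.foldl_nil, label_encoder_step, hc, Bool.false_eq_true, not_false_eq_true,
        if_true, hded, table_append, zero_add]
      refine Prod.ext rfl (Prod.ext ?_ ?_)
      · simp only [List.length_append, List.length_cons, List.length_nil]
        push_cast; ring
      · simp only [hrep, PySem.List.pySetD_natCast, PySem.Dict.getD_insert_self]
        rw [hlen, set_append_cons]
        have hmap : xs.map (fun l => (label_encoder_table (PySem.Set.ofList xs)).getD l 0)
            = xs.map (fun l =>
              ((label_encoder_table (PySem.Set.ofList xs)).insert x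
                ((PySem.Set.ofList xs).length : Int)).getD l 0) := by
          refine List.map_congr_left (fun l hl => ?_)
          rw [PySem.Dict.getD_insert]
          have : l ≠ x := fun he => hmem (he ▸ hl)
          simp [this]
        rw [hmap]
        simp

-- A's code for a label equals the number of distinct labels before its first occurrence
theorem table_getD_eq_card_prefix (xs : List String) (l : String) (i : Nat)
    (h : PySem.List.index? xs l = some i) :
    (label_encoder_table (PySem.Set.ofList xs)).getD l 0 =
      ((PySem.Set.ofList (xs.take i)).length : Int) := by
  induction xs using List.reverseRecOn with
  | nil => simp [PySem.List.index?] at h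
  | append_singleton xs x ih =>
    by_cases hmem : l ∈ xs
    · have hidx : PySem.List.index? xs l = some i := by
        rw [← PySem.List.index?_append_of_mem [x] hmem]; exact h
      have hle : i ≤ xs.length := by
        obtain ⟨pre, suf, hx, hpre, _⟩ := (PySem.List.index?_eq_some_iff xs l i).mp hidx
        subst hpre; rw [hx]; simp
      have htake : (xs ++ [x]).take i = xs.take i := by
        rw [List.take_append_of_le_length hle]
      rw [htake, ← ih hidx]
      by_cases hx : x ∈ xs
      · rw [PySem.Set.ofList_append_singleton,
          PySem.Set.add_of_mem ((PySem.Set.mem_ofList xs x).mpr hx)]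
      · rw [PySem.Set.ofList_append_singleton,
          PySem.Set.add_of_not_mem (fun hc => hx ((PySem.Set.mem_ofList xs x).mp hc)),
          table_append, PySem.Dict.getD_insert]
        have : l ≠ x := fun he => hx (he ▸ hmem)
        simp [this]
    · -- l ∉ xs, so l = x and i = xs.length
      have hl : l = x := by
        have hmem' : l ∈ xs ++ [x] := (PySem.List.index?_isSome_iff (xs ++ [x]) l).mp (by rw [h]; rfl)
        rcases List.mem_append.mp hmem' with h1 | h1
        · exact absurd h1 hmem
        · simpa using h1
      subst hl
      have hi : i = xs.length := by
        rw [PySem.List.index?_append_singleton_self xs l hmem] at h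
        exact (Option.some.injEq _ _).mp h.symm
      have htake : (xs ++ [l]).take i = xs := by
        rw [hi, List.take_append_of_le_length (le_refl _)]; simp
      rw [htake, PySem.Set.ofList_append_singleton,
        PySem.Set.add_of_not_mem (fun hc => hmem ((PySem.Set.mem_ofList xs l).mp hc)),
        table_append, PySem.Dict.getD_insert_self]

-- ===== VERDICT (by name: the statement is the Claim_ definition above) =====
theorem label_encoder_spec : Claim_equal_label_encoder := by
  intro labels _
  show label_encoder labels = label_encoder_alt labels
  unfold label_encoder label_encoder_alt
  rw [label_encoder_inv labels labels.length (le_refl _)]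
  simp only [Nat.sub_self, List.replicate_zero, List.append_nil]
  refine List.map_congr_left (fun l hl => ?_)
  obtain ⟨i, hi⟩ := Option.isSome_iff_exists.mp (((PySem.List.index?_isSome_iff labels l).mpr hl))
  simp only [hi, PySem.List.slice_to_natCast]
  exact table_getD_eq_card_prefix labels l i hi
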